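-- pv_equiv track=rewrite | github.com/lucasgafaria/TCC | XAI_CNNs.py | normalize_key_for_matching
-- ===== SOURCE A (Python) =====
-- def normalize_key_for_matching(k: str) -> str:
--     prefixes = ("module.", "model.", "network.", "net.")
--     new = k
--     changed = True
--     while changed:
--         changed = False
--         for p in prefixes:
--             if new.startswith(p):
--                 new = new[len(p):]
--                 changed = True
--     return new
-- ===== SOURCE B (Python) =====
-- def normalize_key_for_matching(k: str) -> str:
--     for p in ("module.", "model.", "network.", "net."):
--         if k.startswith(p):
--             return normalize_key_for_matching(k[len(p):])
--     return k
-- ===== Notes on version B (the rewrite author's own statement) =====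
-- stated objective: simpler
-- what changed: Replaces A's changed-flag fixpoint while-loop over the prefix tuple with direct recursion that strips the first matching prefix and recurses on the shortened string.
import Mathlib
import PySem

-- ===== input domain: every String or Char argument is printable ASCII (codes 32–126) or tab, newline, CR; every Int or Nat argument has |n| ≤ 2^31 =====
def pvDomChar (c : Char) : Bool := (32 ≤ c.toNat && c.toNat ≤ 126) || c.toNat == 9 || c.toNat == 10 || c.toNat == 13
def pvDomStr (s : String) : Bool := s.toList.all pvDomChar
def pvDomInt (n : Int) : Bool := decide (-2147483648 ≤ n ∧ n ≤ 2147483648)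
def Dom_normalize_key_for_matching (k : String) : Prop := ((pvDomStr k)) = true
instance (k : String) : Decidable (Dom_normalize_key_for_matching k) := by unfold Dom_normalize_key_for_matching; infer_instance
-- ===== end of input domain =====

-- B strips the first matching prefix and recurses, replacing A's changed-flag fixpoint while-loop; same return value, proved total equivalence.

-- ===== PORT A =====
-- prefixes = ("module.", "model.", "network.", "net.")  (as code-point lists; proofs live on the list side)
def pvPrefixes : List (List Char) :=
  [['m','o','d','u','l','e','.'], ['m','o','d','e','l','.'], ['n','e','t','w','o','r','k','.'], ['n','e','t','.']]

-- the inner 'for p in prefixes' loop of A: state (new, changed)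
def pvPassA : List (List Char) → List Char → Bool → List Char × Bool
  | [], new, changed => (new, changed)
  | p :: ps, new, changed =>
      if PySem.Chars.startswith new p then
        pvPassA ps (PySem.Chars.slice new (some (p.length : Int)) none) true
      else
        pvPassA ps new changed

theorem pvPassA_len_le : ∀ (ps : List (List Char)) (new : List Char) (c : Bool),
    (pvPassA ps new c).1.length ≤ new.length := by
  intro ps
  induction ps with
  | nil => intro new c; simp [pvPassA]
  | cons p ps ih =>
      intro new c
      simp only [pvPassA]
      split
      · exact le_trans (ih _ _) (by simp [PySem.List.slice_from_natCast])
      · exact ih _ _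

theorem pvPassA_shrink : ∀ (ps : List (List Char)) (new : List Char) (c : Bool),
    (∀ p ∈ ps, p ≠ []) → (pvPassA ps new c).2 = true →
    c = true ∨ (pvPassA ps new c).1.length < new.length := by
  intro ps
  induction ps with
  | nil => intro new c _ h; simp [pvPassA] at h; simp [h]
  | cons p ps ih =>
      intro new c hne h
      simp only [pvPassA] at h ⊢
      by_cases hs : PySem.Chars.startswith new p = true
      · right
        simp only [hs, if_pos] at h ⊢
        have hp : p <+: new := (PySem.Chars.startswith_iff new p).mp hs
        have hlen : p.length ≤ new.length := hp.length_le
        have hpne : p ≠ [] := hne p (by simp)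
        have hppos : 0 < p.length := List.length_pos_iff.mpr hpne
        have hle := pvPassA_len_le ps (PySem.Chars.slice new (some (p.length : Int)) none) true
        have : (PySem.Chars.slice new (some (p.length : Int)) none).length = new.length - p.length := by
          simp [PySem.List.slice_from_natCast]
        omega
      · have hs' : PySem.Chars.startswith new p = false := by simpa using hs
        simp only [hs', Bool.false_eq_true, if_false] at h ⊢
        exact ih new c (fun q hq => hne q (by simp [hq])) h

-- the 'while changed' loop of A (one pass per iteration)
def pvLoopA (new : List Char) : List Char :=
  if h : (pvPassA pvPrefixes new false).2 = true then
    pvLoopA (pvPassA pvPrefixes new false).1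
  else
    (pvPassA pvPrefixes new false).1
termination_by new.length
decreasing_by
  rcases pvPassA_shrink pvPrefixes new false (by decide) h with h' | h'
  · cases h'
  · exact h'

def normalize_key_for_matching (k : String) : String :=
  String.ofList (pvLoopA k.toList)

-- ===== PORT B =====
-- B's 'for p in prefixes: if k.startswith(p): return rec(k[len(p):])' — first matching prefix, or none
def pvFindStrip : List (List Char) → List Char → Option (List Char)
  | [], _ => none
  | p :: ps, k =>
      if PySem.Chars.startswith k p then
        some (PySem.Chars.slice k (some (p.length : Int)) none)
      else
        pvFindStrip ps k

theorem pvFindStrip_shrink : ∀ (ps : List (List Char)) (k t : List Char),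
    (∀ p ∈ ps, p ≠ []) → pvFindStrip ps k = some t → t.length < k.length := by
  intro ps
  induction ps with
  | nil => intro k t _ h; simp [pvFindStrip] at h
  | cons p ps ih =>
      intro k t hne h
      simp only [pvFindStrip] at h
      by_cases hs : PySem.Chars.startswith k p = true
      · simp only [hs, if_pos, Option.some.injEq] at h
        have hp : p <+: k := (PySem.Chars.startswith_iff k p).mp hs
        have hppos : 0 < p.length := List.length_pos_iff.mpr (hne p (by simp))
        have hlen : p.length ≤ k.length := hp.length_le
        subst h
        simp [PySem.List.slice_from_natCast]
        omega
      · have hs' : PySem.Chars.startswith k p = false := by simpa using hs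
        simp only [hs', Bool.false_eq_true, if_false] at h
        exact ih k t (fun q hq => hne q (by simp [hq])) h

def pvAltGo (k : List Char) : List Char :=
  match h : pvFindStrip pvPrefixes k with
  | some t => pvAltGo t
  | none => k
termination_by k.length
decreasing_by
  exact pvFindStrip_shrink pvPrefixes k t (by decide) h

def normalize_key_for_matching_alt (k : String) : String :=
  String.ofList (pvAltGo k.toList)

-- ===== PRECONDITION & SPEC =====
def Spec_normalize_key_for_matching (k : String) (out : String) : Prop := out = normalize_key_for_matching_alt k
instance (k : String) (out : String) : Decidable (Spec_normalize_key_for_matching k out) := by unfold Spec_normalize_key_for_matching; infer_instance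

-- ===== CLAIM (what is proved, stated in full; the proofs are below) =====
def Claim_equal_normalize_key_for_matching : Prop := ∀ (k : String), Dom_normalize_key_for_matching k → Spec_normalize_key_for_matching k (normalize_key_for_matching k)

-- ===== LEMMAS AND PROOFS =====

-- no prefix in pvPrefixes is a prefix of another: a string has at most one matching prefix,
-- so pvFindStrip returns exactly the strip of ANY matching prefix
theorem pvUniq (t : List Char) (p : List Char) (hp : p ∈ pvPrefixes)
    (hs : PySem.Chars.startswith t p = true) :
    pvFindStrip pvPrefixes t = some (PySem.Chars.slice t (some (p.length : Int)) none) := by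
  have hpre : p <+: t := (PySem.Chars.startswith_iff t p).mp hs
  obtain ⟨r, rfl⟩ := hpre
  fin_cases hp <;> simp [pvFindStrip, pvPrefixes, PySem.Chars.startswith, List.isPrefixOf]

theorem pvAltGo_strip (t : List Char) (p : List Char) (hp : p ∈ pvPrefixes)
    (hs : PySem.Chars.startswith t p = true) :
    pvAltGo t = pvAltGo (PySem.Chars.slice t (some (p.length : Int)) none) := by
  rw [pvAltGo]
  split
  · next t1 heq =>
      have h2 := (pvUniq t p hp hs).symm.trans heq
      injection h2 with h2
      rw [h2]
  · next heq => simp [pvUniq t p hp hs] at heq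

theorem pvPassA_alt : ∀ (ps : List (List Char)), (∀ p ∈ ps, p ∈ pvPrefixes) →
    ∀ (s : List Char) (c : Bool), pvAltGo (pvPassA ps s c).1 = pvAltGo s := by
  intro ps
  induction ps with
  | nil => intro _ s c; simp [pvPassA]
  | cons p ps ih =>
      intro hsub s c
      simp only [pvPassA]
      by_cases hs : PySem.Chars.startswith s p = true
      · simp only [hs, if_pos]
        rw [ih (fun q hq => hsub q (by simp [hq])) _ true]
        exact (pvAltGo_strip s p (hsub p (by simp)) hs).symm
      · have hs' : PySem.Chars.startswith s p = false := by simpa using hs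
        simp only [hs', Bool.false_eq_true, if_false]
        exact ih (fun q hq => hsub q (by simp [hq])) s c

theorem pvPassA_true : ∀ (ps : List (List Char)) (s : List Char), (pvPassA ps s true).2 = true := by
  intro ps
  induction ps with
  | nil => intro s; simp [pvPassA]
  | cons p ps ih => intro s; simp only [pvPassA]; split <;> exact ih _

theorem pvPassA_false : ∀ (ps : List (List Char)) (s : List Char),
    (pvPassA ps s false).2 = false →
    (pvPassA ps s false).1 = s ∧ pvFindStrip ps s = none := by
  intro ps
  induction ps with
  | nil => intro s _; simp [pvPassA, pvFindStrip]
  | cons p ps ih =>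
      intro s h
      simp only [pvPassA, pvFindStrip] at h ⊢
      by_cases hs : PySem.Chars.startswith s p = true
      · simp only [hs, if_pos] at h
        rw [pvPassA_true] at h
        cases h
      · have hs' : PySem.Chars.startswith s p = false := by simpa using hs
        simp only [hs', Bool.false_eq_true, if_false] at h ⊢
        exact ih s h

theorem pvAltGo_none (s : List Char) (h : pvFindStrip pvPrefixes s = none) : pvAltGo s = s := by
  rw [pvAltGo]
  split
  · next t1 heq => rw [h] at heq; cases heq
  · rfl

theorem pvLoopA_eq_altGo (s : List Char) : pvLoopA s = pvAltGo s := by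
  rw [pvLoopA]
  by_cases h : (pvPassA pvPrefixes s false).2 = true
  · simp only [h, dif_pos]
    have hlt : (pvPassA pvPrefixes s false).1.length < s.length := by
      rcases pvPassA_shrink pvPrefixes s false (by decide) h with h' | h'
      · cases h'
      · exact h'
    rw [pvLoopA_eq_altGo (pvPassA pvPrefixes s false).1]
    exact pvPassA_alt pvPrefixes (fun p hp => hp) s false
  · rw [dif_neg h]
    obtain ⟨h1, h2⟩ := pvPassA_false pvPrefixes s (by simpa using h)
    rw [h1]
    exact (pvAltGo_none s h2).symm
termination_by s.length

-- ===== VERDICT (by name: the statement is the Claim_ definition above) =====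
theorem normalize_key_for_matching_spec : Claim_equal_normalize_key_for_matching := by
  intro k _
  unfold Spec_normalize_key_for_matching normalize_key_for_matching normalize_key_for_matching_alt
  rw [pvLoopA_eq_altGo]
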